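-- pv_equiv track=rewrite | github.com/vZyx/Python-notes | 12_lists/code/08_practice3_largest2/02.py | top2_argmax_v2
-- ===== SOURCE A (Python) =====
-- def top2_argmax_v2(lst):
--     # Given a list: return the indices of the first and second maximum
--     if len(lst) < 2:
--         return None, None
--
--     # Use the first 2 positions for the top 2 max
--     max1_pos, max2_pos = 0, 1
--     if lst[max1_pos] < lst[max2_pos]:
--         max1_pos, max2_pos = 1, 0
--
--     # Iterate and update the indices based on current element if bigger
--     for cur_pos in range(2, len(lst)):
--         if lst[max1_pos] < lst[cur_pos]:
--             max1_pos, max2_pos = cur_pos, max1_pos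
--         elif lst[max2_pos] < lst[cur_pos]:
--             max2_pos = cur_pos
--
--     return max1_pos, max2_pos
-- ===== SOURCE B (Python) =====
-- def top2_argmax_v2(lst):
--     # Given a list: return the indices of the first and second maximum
--     if len(lst) < 2:
--         return None, None
--     # first index achieving the maximum (max returns the first maximal element)
--     max1_pos = max(range(len(lst)), key=lambda i: lst[i])
--     # first maximal index among all positions except max1_pos
--     max2_pos = max((i for i in range(len(lst)) if i != max1_pos), key=lambda i: lst[i])
--     return max1_pos, max2_pos
-- ===== Notes on version B (the rewrite author's own statement) =====
-- stated objective: simpler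
-- what changed: Replaced the single-pass two-variable tournament that updates (max1_pos, max2_pos) with two independent first-occurrence argmax scans: max over all indices, then max over the indices excluding the winning one.
import Mathlib
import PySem

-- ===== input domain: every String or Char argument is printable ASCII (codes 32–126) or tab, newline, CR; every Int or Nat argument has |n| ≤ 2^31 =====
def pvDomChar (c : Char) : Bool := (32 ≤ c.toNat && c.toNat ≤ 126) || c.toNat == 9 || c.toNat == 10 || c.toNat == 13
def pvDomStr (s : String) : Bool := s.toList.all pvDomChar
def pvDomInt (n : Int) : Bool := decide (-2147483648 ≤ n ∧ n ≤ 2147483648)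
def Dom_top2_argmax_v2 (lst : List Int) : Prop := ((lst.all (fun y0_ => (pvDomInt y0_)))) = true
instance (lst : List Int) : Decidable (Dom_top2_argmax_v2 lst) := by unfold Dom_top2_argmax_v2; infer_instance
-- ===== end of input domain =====

-- B replaces A's one-pass two-variable tournament by two independent first-occurrence
-- argmax scans (all indices, then all indices except the winner); objective: simpler.


-- ===== PORT A =====
-- A's tournament loop body: the two strict-comparison branches in order.
def pvStepA (key : Int → Int) (p : Int × Int) (cur : Int) : Int × Int :=
  if key p.1 < key cur then (cur, p.1)
  else if key p.2 < key cur then (p.1, cur)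
  else p

def top2_argmax_v2 (lst : List Int) : Option Int × Option Int :=
  if PySem.List.len lst < 2 then (none, none)
  else
    -- max1_pos, max2_pos = 0, 1; swap if lst[0] < lst[1]
    let key : Int → Int := fun i => PySem.List.pyGetD lst i 0
    let init : Int × Int := if key 0 < key 1 then (1, 0) else (0, 1)
    let s := (PySem.List.pyRange 2 (PySem.List.len lst) 1).foldl (pvStepA key) init
    (some s.1, some s.2)

-- ===== PORT B =====
def top2_argmax_v2_alt (lst : List Int) : Option Int × Option Int :=
  if PySem.List.len lst < 2 then (none, none)
  else
    let key : Int → Int := fun i => PySem.List.pyGetD lst i 0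
    match PySem.List.max? (PySem.List.pyRange 0 (PySem.List.len lst) 1) key with
    | none => (none, none)      -- unreachable: the range is nonempty (len ≥ 2)
    | some m1 =>
      match PySem.List.max? ((PySem.List.pyRange 0 (PySem.List.len lst) 1).filter (· ≠ m1)) key with
      | none => (none, none)    -- unreachable: some index ≠ m1 exists (len ≥ 2)
      | some m2 => (some m1, some m2)

-- ===== PRECONDITION & SPEC =====
def Spec_top2_argmax_v2 (lst : List Int) (out : Option Int × Option Int) : Prop := out = top2_argmax_v2_alt lst
instance (lst : List Int) (out : Option Int × Option Int) : Decidable (Spec_top2_argmax_v2 lst out) := by unfold Spec_top2_argmax_v2; infer_instance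

-- ===== CLAIM (what is proved, stated in full; the proofs are below) =====
def Claim_equal_top2_argmax_v2 : Prop := ∀ (lst : List Int), Dom_top2_argmax_v2 lst → Spec_top2_argmax_v2 lst (top2_argmax_v2 lst)

-- ===== LEMMAS AND PROOFS =====

-- max? over a list extended on the right: one comparison against the old maximum.
theorem pv_max?_append_singleton (xs : List Int) (x : Int) (key : Int → Int) :
    PySem.List.max? (xs ++ [x]) key =
      match PySem.List.max? xs key with
      | none => some x
      | some m => if key m < key x then some x else some m := by
  rcases hm : PySem.List.max? xs key with _ | m
  · have hx := (PySem.List.max?_eq_none_iff xs key).1 hm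
    subst hx
    simp [PySem.List.max?]
  · simp only [PySem.List.max?] at hm
    simp only [PySem.List.max?, List.foldl_append, hm, List.foldl_cons, List.foldl_nil]

-- Loop invariant for A's tournament over range(2, k), phrased against B's two argmax scans.
theorem pv_loop_inv (key : Int → Int) (k : Int) (hk : 2 ≤ k) :
    PySem.List.max? (PySem.List.pyRange 0 k 1) key =
        some ((PySem.List.pyRange 2 k 1).foldl (pvStepA key)
          (if key 0 < key 1 then ((1:Int), (0:Int)) else (0, 1))).1 ∧
      PySem.List.max? ((PySem.List.pyRange 0 k 1).filter
          (fun x => !decide (x = ((PySem.List.pyRange 2 k 1).foldl (pvStepA key)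
            (if key 0 < key 1 then ((1:Int), (0:Int)) else (0, 1))).1))) key =
        some ((PySem.List.pyRange 2 k 1).foldl (pvStepA key)
          (if key 0 < key 1 then ((1:Int), (0:Int)) else (0, 1))).2 := by
  induction k, hk using Int.le_induction with
  | base =>
      by_cases h : key 0 < key 1 <;>
        simp [PySem.List.max?, PySem.List.pyRange_one, List.range_succ, h]
  | succ k hk ih =>
      have hsplit0 : PySem.List.pyRange 0 (k + 1) 1 = PySem.List.pyRange 0 k 1 ++ [k] :=
        PySem.List.pyRange_one_succ_right (by omega)
      have hsplit2 : PySem.List.pyRange 2 (k + 1) 1 = PySem.List.pyRange 2 k 1 ++ [k] :=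
        PySem.List.pyRange_one_succ_right hk
      set init : Int × Int := if key 0 < key 1 then ((1:Int), (0:Int)) else (0, 1) with hinit
      set s := (PySem.List.pyRange 2 k 1).foldl (pvStepA key) init with hs
      obtain ⟨ih1, ih2⟩ := ih
      have hm1mem : s.1 ∈ PySem.List.pyRange 0 k 1 := PySem.List.max?_mem ih1
      have hm1lt : s.1 < k := ((PySem.List.mem_pyRange_one).1 hm1mem).2
      have hfold : (PySem.List.pyRange 2 (k+1) 1).foldl (pvStepA key) init = pvStepA key s k := by
        rw [hsplit2, List.foldl_append]; rfl
      have hkne : ¬ (k = s.1) := by omega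
      rw [hfold, hsplit0]
      unfold pvStepA
      by_cases h1 : key s.1 < key k
      · -- new maximum at index k; old max1 becomes max2
        simp only [h1, if_true]
        constructor
        · rw [pv_max?_append_singleton, ih1]; simp [h1]
        · have hfilt : (PySem.List.pyRange 0 k 1 ++ [k]).filter (fun x => !decide (x = k))
              = PySem.List.pyRange 0 k 1 := by
            rw [List.filter_append]
            have h' : (PySem.List.pyRange 0 k 1).filter (fun x => !decide (x = k))
                = PySem.List.pyRange 0 k 1 := by
              apply List.filter_eq_self.2
              intro a ha
              have := ((PySem.List.mem_pyRange_one).1 ha).2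
              simp; omega
            simp [h']
          rw [hfilt]; exact ih1
      · by_cases h2 : key s.2 < key k
        · -- k becomes the new second maximum
          simp only [h1, if_false, h2, if_true]
          refine ⟨by rw [pv_max?_append_singleton, ih1]; simp [h1], ?_⟩
          rw [List.filter_append]
          have hfk : List.filter (fun x => !decide (x = s.1)) [k] = [k] := by simp [hkne]
          rw [hfk, pv_max?_append_singleton, ih2]
          simp [h2]
        · -- no change
          simp only [h1, if_false, h2]
          refine ⟨by rw [pv_max?_append_singleton, ih1]; simp [h1], ?_⟩
          rw [List.filter_append]
          have hfk : List.filter (fun x => !decide (x = s.1)) [k] = [k] := by simp [hkne]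
          rw [hfk, pv_max?_append_singleton, ih2]
          simp [h2]

-- ===== VERDICT (by name: the statement is the Claim_ definition above) =====
theorem top2_argmax_v2_spec : Claim_equal_top2_argmax_v2 := by
  intro lst _
  unfold Spec_top2_argmax_v2 top2_argmax_v2 top2_argmax_v2_alt
  by_cases hlen : PySem.List.len lst < 2
  · rw [if_pos hlen, if_pos hlen]
  · rw [if_neg hlen, if_neg hlen]
    dsimp only
    simp only [ne_eq, decide_not]
    obtain ⟨h1, h2⟩ := pv_loop_inv (fun i => PySem.List.pyGetD lst i 0)
      (PySem.List.len lst) (by omega)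
    rw [h1]
    simp only [h2]
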